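-- pv_equiv track=rewrite | github.com/mykrok/mykrok | scripts/generate_screenshots.py | generate_readme_section
-- ===== SOURCE A (Python) =====
-- def generate_readme_section(screenshots: list[tuple[str, str]]) -> str:
--     """Generate markdown for README.md screenshots section."""
--     lines = [
--         "## Screenshots",
--         "",
--         "The unified web frontend provides a complete activity browsing experience.",
--         "Screenshots are auto-generated from the demo dataset.",
--         "",
--     ]
--
--     # Group screenshots by view
--     views = {
--         "Map View": ["01-", "02-", "03-"],
--         "Sessions View": ["04-", "05-", "06-"],
--         "Session Detail": ["07-"],
--         "Statistics": ["08-", "09-"],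
--     }
--
--     for view_name, prefixes in views.items():
--         view_screenshots = [
--             (f, c) for f, c in screenshots if any(f.startswith(p) for p in prefixes)
--         ]
--         if view_screenshots:
--             lines.append(f"### {view_name}")
--             lines.append("")
--             for filename, caption in view_screenshots:
--                 lines.append(f"![{caption}](docs/screenshots/{filename})")
--                 lines.append(f"*{caption}*")
--                 lines.append("")
--
--     return "\n".join(lines)
-- ===== SOURCE B (Python) =====
-- def generate_readme_section(screenshots: list[tuple[str, str]]) -> str:
--     """Generate markdown for README.md screenshots section.
--
--     Single pass: dispatch each screenshot by its 3-char numeric prefix into one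
--     of four per-view buckets, then emit the views in their fixed order.
--     """
--     map_v, sess_v, det_v, stat_v = [], [], [], []
--     for f, c in screenshots:
--         p = f[:3]
--         if p in ("01-", "02-", "03-"):
--             map_v.append((f, c))
--         elif p in ("04-", "05-", "06-"):
--             sess_v.append((f, c))
--         elif p == "07-":
--             det_v.append((f, c))
--         elif p in ("08-", "09-"):
--             stat_v.append((f, c))
--     out = [
--         "## Screenshots",
--         "",
--         "The unified web frontend provides a complete activity browsing experience.",
--         "Screenshots are auto-generated from the demo dataset.",
--         "",
--     ]
--     for name, group in [
--         ("Map View", map_v),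
--         ("Sessions View", sess_v),
--         ("Session Detail", det_v),
--         ("Statistics", stat_v),
--     ]:
--         if group:
--             out.append(f"### {name}")
--             out.append("")
--             for f, c in group:
--                 out.append(f"![{c}](docs/screenshots/{f})")
--                 out.append(f"*{c}*")
--                 out.append("")
--     return "\n".join(out)
-- ===== Notes on version B (the rewrite author's own statement) =====
-- stated objective: faster
-- what changed: Replaces A's four full rescans of the screenshot list (one filter with a nested any-startswith per view) by a single grouping pass that dispatches each screenshot by its 3-character prefix into one of four ordered buckets, then one emit pass over the fixed view order.
import Mathlib
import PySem

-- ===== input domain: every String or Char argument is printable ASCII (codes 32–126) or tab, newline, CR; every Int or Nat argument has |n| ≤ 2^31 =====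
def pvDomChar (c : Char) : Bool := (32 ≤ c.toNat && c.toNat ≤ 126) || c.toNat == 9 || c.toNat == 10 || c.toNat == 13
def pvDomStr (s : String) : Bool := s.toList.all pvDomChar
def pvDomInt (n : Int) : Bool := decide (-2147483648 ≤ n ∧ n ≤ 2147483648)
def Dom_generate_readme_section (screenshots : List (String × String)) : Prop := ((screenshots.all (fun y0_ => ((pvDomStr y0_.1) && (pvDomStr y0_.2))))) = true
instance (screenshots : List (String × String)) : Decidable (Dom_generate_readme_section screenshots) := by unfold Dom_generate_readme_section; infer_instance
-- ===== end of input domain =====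

-- B replaces A's four full rescans of the list by a single prefix-dispatch grouping pass plus one ordered emit pass.

-- ===== PORT A =====
-- the fixed header lines of A
def pvHeaderA : List String :=
  ["## Screenshots", "",
   "The unified web frontend provides a complete activity browsing experience.",
   "Screenshots are auto-generated from the demo dataset.", ""]

-- the views dict of A, in insertion order
def pvViewsA : List (String × List String) :=
  [("Map View", ["01-", "02-", "03-"]),
   ("Sessions View", ["04-", "05-", "06-"]),
   ("Session Detail", ["07-"]),
   ("Statistics", ["08-", "09-"])]

-- the inner 'for filename, caption in view_screenshots' loop of A
def pvEmitA (lines : List String) (vs : List (String × String)) : List String :=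
  vs.foldl (fun l fc =>
    l ++ ["![" ++ fc.2 ++ "](docs/screenshots/" ++ fc.1 ++ ")", "*" ++ fc.2 ++ "*", ""]) lines

def generate_readme_section (screenshots : List (String × String)) : String :=
  let lines := pvViewsA.foldl (fun lines vp =>
    let vs := screenshots.filter (fun fc => vp.2.any (fun p => PySem.Str.startswith fc.1 p))
    if vs.isEmpty then lines else pvEmitA (lines ++ ["### " ++ vp.1, ""]) vs) pvHeaderA
  PySem.Str.join "\n" lines

-- ===== PORT B =====
-- the loop body of B: dispatch one screenshot by its 3-char prefix f[:3] into one of four buckets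
def pvStepB (b : List (String × String) × List (String × String) × List (String × String) × List (String × String))
    (fc : String × String) :
    List (String × String) × List (String × String) × List (String × String) × List (String × String) :=
  let p := PySem.Str.slice fc.1 none (some 3)
  if p == "01-" || p == "02-" || p == "03-" then (b.1 ++ [fc], b.2.1, b.2.2.1, b.2.2.2)
  else if p == "04-" || p == "05-" || p == "06-" then (b.1, b.2.1 ++ [fc], b.2.2.1, b.2.2.2)
  else if p == "07-" then (b.1, b.2.1, b.2.2.1 ++ [fc], b.2.2.2)
  else if p == "08-" || p == "09-" then (b.1, b.2.1, b.2.2.1, b.2.2.2 ++ [fc])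
  else b

def generate_readme_section_alt (screenshots : List (String × String)) : String :=
  let bs := screenshots.foldl pvStepB ([], [], [], [])
  let out : List String :=
    ["## Screenshots", "",
     "The unified web frontend provides a complete activity browsing experience.",
     "Screenshots are auto-generated from the demo dataset.", ""]
  let out := [("Map View", bs.1), ("Sessions View", bs.2.1),
              ("Session Detail", bs.2.2.1), ("Statistics", bs.2.2.2)].foldl
    (fun out ng =>
      if ng.2.isEmpty then out
      else ng.2.foldl (fun o fc =>
        o ++ ["![" ++ fc.2 ++ "](docs/screenshots/" ++ fc.1 ++ ")", "*" ++ fc.2 ++ "*", ""])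
        (out ++ ["### " ++ ng.1, ""])) out
  PySem.Str.join "\n" out

-- ===== PRECONDITION & SPEC =====
def Spec_generate_readme_section (screenshots : List (String × String)) (out : String) : Prop := out = generate_readme_section_alt screenshots
instance (screenshots : List (String × String)) (out : String) : Decidable (Spec_generate_readme_section screenshots out) := by unfold Spec_generate_readme_section; infer_instance

-- ===== CLAIM (what is proved, stated in full; the proofs are below) =====
def Claim_equal_generate_readme_section : Prop := ∀ (screenshots : List (String × String)), Dom_generate_readme_section screenshots → Spec_generate_readme_section screenshots (generate_readme_section screenshots)

-- ===== LEMMAS AND PROOFS =====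

-- f[:3] == p (for a 3-char literal p) is exactly f.startswith(p)
theorem pv_slice3_eq_startswith (f p : String) (h : p.toList.length = 3) :
    (PySem.Str.slice f none (some 3) == p) = PySem.Str.startswith f p := by
  rw [Bool.eq_iff_iff, beq_iff_eq, PySem.Str.startswith_eq]
  constructor
  · intro he
    have : (PySem.Str.slice f none (some 3)).toList = p.toList := by rw [he]
    rw [PySem.Str.toList_slice, PySem.Chars.slice_eq_listSlice] at this
    rw [show ((3:Int) = ((3:Nat):Int)) from rfl, PySem.List.slice_to_natCast] at this
    simp only [PySem.Chars.startswith, List.isPrefixOf_iff_prefix]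
    exact this ▸ List.take_prefix 3 f.toList
  · intro hp
    simp only [PySem.Chars.startswith, List.isPrefixOf_iff_prefix] at hp
    obtain ⟨t, ht⟩ := hp
    apply String.ext
    rw [PySem.Str.toList_slice, PySem.Chars.slice_eq_listSlice,
      show ((3:Int) = ((3:Nat):Int)) from rfl, PySem.List.slice_to_natCast, ← ht, ← h,
      List.take_left]

theorem pv_fold_buckets (s : List (String × String))
    (a b c d : List (String × String)) :
    s.foldl pvStepB (a, b, c, d) =
      (a ++ s.filter (fun x => (PySem.Str.slice x.1 none (some 3) == "01-" || PySem.Str.slice x.1 none (some 3) == "02-" || PySem.Str.slice x.1 none (some 3) == "03-")),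
       b ++ s.filter (fun x => !(PySem.Str.slice x.1 none (some 3) == "01-" || PySem.Str.slice x.1 none (some 3) == "02-" || PySem.Str.slice x.1 none (some 3) == "03-") && (PySem.Str.slice x.1 none (some 3) == "04-" || PySem.Str.slice x.1 none (some 3) == "05-" || PySem.Str.slice x.1 none (some 3) == "06-")),
       c ++ s.filter (fun x => !(PySem.Str.slice x.1 none (some 3) == "01-" || PySem.Str.slice x.1 none (some 3) == "02-" || PySem.Str.slice x.1 none (some 3) == "03-") && !(PySem.Str.slice x.1 none (some 3) == "04-" || PySem.Str.slice x.1 none (some 3) == "05-" || PySem.Str.slice x.1 none (some 3) == "06-") && (PySem.Str.slice x.1 none (some 3) == "07-")),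
       d ++ s.filter (fun x => !(PySem.Str.slice x.1 none (some 3) == "01-" || PySem.Str.slice x.1 none (some 3) == "02-" || PySem.Str.slice x.1 none (some 3) == "03-") && !(PySem.Str.slice x.1 none (some 3) == "04-" || PySem.Str.slice x.1 none (some 3) == "05-" || PySem.Str.slice x.1 none (some 3) == "06-") && !(PySem.Str.slice x.1 none (some 3) == "07-") && (PySem.Str.slice x.1 none (some 3) == "08-" || PySem.Str.slice x.1 none (some 3) == "09-"))) := by
  induction s generalizing a b c d with
  | nil => simp
  | cons x s ih =>
    simp only [List.foldl_cons, List.filter_cons]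
    by_cases h1 : (PySem.Str.slice x.1 none (some 3) == "01-" || PySem.Str.slice x.1 none (some 3) == "02-" || PySem.Str.slice x.1 none (some 3) == "03-") = true <;>
    by_cases h2 : (PySem.Str.slice x.1 none (some 3) == "04-" || PySem.Str.slice x.1 none (some 3) == "05-" || PySem.Str.slice x.1 none (some 3) == "06-") = true <;>
    by_cases h3 : (PySem.Str.slice x.1 none (some 3) == "07-") = true <;>
    by_cases h4 : (PySem.Str.slice x.1 none (some 3) == "08-" || PySem.Str.slice x.1 none (some 3) == "09-") = true <;>
    simp only [pvStepB, h1, h2, h3, h4, if_true, Bool.not_true, Bool.not_false,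
      Bool.and_false, Bool.and_true, Bool.not_eq_true] at * <;>
    simp [ih, List.append_assoc]


theorem pv_pt2 (p : String) :
    (!(p == "01-" || p == "02-" || p == "03-") && (p == "04-" || p == "05-" || p == "06-"))
      = (p == "04-" || p == "05-" || p == "06-") := by
  rcases Bool.eq_false_or_eq_true (p == "04-" || p == "05-" || p == "06-") with hc | hc
  · have h : (p = "04-" ∨ p = "05-") ∨ p = "06-" := by simpa using hc
    rcases h with (h | h) | h <;> subst h <;> decide
  · rw [hc, Bool.and_false]

theorem pv_pt3 (p : String) :
    (!(p == "01-" || p == "02-" || p == "03-") && !(p == "04-" || p == "05-" || p == "06-") && (p == "07-"))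
      = (p == "07-") := by
  rcases Bool.eq_false_or_eq_true (p == "07-") with hc | hc
  · have h : p = "07-" := by simpa using hc
    subst h; decide
  · rw [hc, Bool.and_false]

theorem pv_pt4 (p : String) :
    (!(p == "01-" || p == "02-" || p == "03-") && !(p == "04-" || p == "05-" || p == "06-") && !(p == "07-") && (p == "08-" || p == "09-"))
      = (p == "08-" || p == "09-") := by
  rcases Bool.eq_false_or_eq_true (p == "08-" || p == "09-") with hc | hc
  · have h : p = "08-" ∨ p = "09-" := by simpa using hc
    rcases h with h | h <;> subst h <;> decide
  · rw [hc, Bool.and_false]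

theorem pv_main (s : List (String × String)) : generate_readme_section s = generate_readme_section_alt s := by
  unfold generate_readme_section generate_readme_section_alt
  simp only [pvViewsA, List.foldl_cons, List.foldl_nil, pv_fold_buckets, List.nil_append,
    List.any_cons, List.any_nil, Bool.or_false]
  simp only [List.filter_congr (fun (x : String × String) _ => pv_pt2 (PySem.Str.slice x.1 none (some 3))),
    List.filter_congr (fun (x : String × String) _ => pv_pt3 (PySem.Str.slice x.1 none (some 3))),
    List.filter_congr (fun (x : String × String) _ => pv_pt4 (PySem.Str.slice x.1 none (some 3)))]
  simp only [pv_slice3_eq_startswith _ _ (show (("01-":String)).toList.length = 3 by decide),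
    pv_slice3_eq_startswith _ _ (show (("02-":String)).toList.length = 3 by decide),
    pv_slice3_eq_startswith _ _ (show (("03-":String)).toList.length = 3 by decide),
    pv_slice3_eq_startswith _ _ (show (("04-":String)).toList.length = 3 by decide),
    pv_slice3_eq_startswith _ _ (show (("05-":String)).toList.length = 3 by decide),
    pv_slice3_eq_startswith _ _ (show (("06-":String)).toList.length = 3 by decide),
    pv_slice3_eq_startswith _ _ (show (("07-":String)).toList.length = 3 by decide),
    pv_slice3_eq_startswith _ _ (show (("08-":String)).toList.length = 3 by decide),
    pv_slice3_eq_startswith _ _ (show (("09-":String)).toList.length = 3 by decide)]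
  simp only [pvEmitA, pvHeaderA, Bool.or_assoc]

-- ===== VERDICT (by name: the statement is the Claim_ definition above) =====
theorem generate_readme_section_spec : Claim_equal_generate_readme_section := by
  intro s _
  exact pv_main s
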